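-- pv_equiv track=rewrite | github.com/NelliaS/advent_of_code | advent_of_code_2015/day_3.py | visited_houses2
-- ===== SOURCE A (Python) =====
-- def translator(instructions):
--     '''Returns coordinates.
--     Input is array of instructions, where north is ^, south v, < west and > east.
--     From instructions an array of tuples as coordinates (x, y) is made.'''
--     coordinates = []
--     x = 0       # -1 for west, +1 for east
--     y = 0       # +1 for north, -1 for south
--     for sign in instructions:
--         if sign == '<':       # -1 east
--             x -= 1
--         elif sign == '>':     # +1 west
--             x += 1
--         elif sign == '^':     # +1 north
--             y += 1
--         else:                 # -1 south
--             y -= 1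
--         coordinates.append((x,y))
--     return coordinates
--
-- def visited_houses2(instructions):
--     '''Returns number of houses visited by Santa and Robo-Santa.
--     Instructions are divided into santa_instructions and robo_santa_instructions strings.
--     Two arrays of tuples as coordinates (x,y) are made using function translator(instructions).
--     Both arrays are merged and only number of original (non-repeated) coordinates is returned'''
--     santa_instructions = ''
--     robo_santa_instructions = ''
--     for i, sign in enumerate(instructions):    # even instructions are for Santa, odd for Robo-santa
--         if i % 2 == 0:
--             santa_instructions += sign
--         else:
--             robo_santa_instructions += sign
--     coordinates_santa = translator(santa_instructions)
--     coordinates_robo_santa = translator(robo_santa_instructions)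
--     coordinates_both_original = set(coordinates_santa + coordinates_robo_santa)
--     return len(coordinates_both_original)
-- ===== SOURCE B (Python) =====
-- def visited_houses2(instructions):
--     '''Single pass: keep both agents' positions and one set of visited houses.'''
--     santa = (0, 0)
--     robo = (0, 0)
--     seen = set()
--     for i, sign in enumerate(instructions):
--         if sign == '<':
--             d = (-1, 0)
--         elif sign == '>':
--             d = (1, 0)
--         elif sign == '^':
--             d = (0, 1)
--         else:
--             d = (0, -1)
--         if i % 2 == 0:
--             santa = (santa[0] + d[0], santa[1] + d[1])
--             seen.add(santa)
--         else:
--             robo = (robo[0] + d[0], robo[1] + d[1])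
--             seen.add(robo)
--     return len(seen)
-- ===== Notes on version B (the rewrite author's own statement) =====
-- stated objective: simpler
-- what changed: Instead of splitting the instruction string into two strings and translating each into a full coordinate list before deduplicating, B walks the instructions once, keeping both agents' current positions and inserting each new position into one set as it goes.
import Mathlib
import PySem

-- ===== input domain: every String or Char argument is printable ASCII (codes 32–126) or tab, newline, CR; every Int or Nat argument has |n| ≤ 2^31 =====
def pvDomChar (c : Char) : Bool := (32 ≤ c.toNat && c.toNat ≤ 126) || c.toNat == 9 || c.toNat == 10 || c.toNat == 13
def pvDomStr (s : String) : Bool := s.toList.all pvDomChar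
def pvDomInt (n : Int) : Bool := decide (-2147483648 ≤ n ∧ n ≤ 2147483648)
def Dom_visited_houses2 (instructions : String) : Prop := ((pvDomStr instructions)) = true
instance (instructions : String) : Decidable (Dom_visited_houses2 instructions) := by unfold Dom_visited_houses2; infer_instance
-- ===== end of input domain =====

-- B replaces A's split-translate-merge pipeline by a single interleaved walk over the
-- instructions that inserts each new position into one set (objective: simpler, same O(n)).

-- ===== PORT A =====
-- helper: A's per-character move (branches in A's order, else = south)
def pvMoveA (p : Int × Int) (c : Char) : Int × Int :=
  if c = '<' then (p.1 - 1, p.2)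
  else if c = '>' then (p.1 + 1, p.2)
  else if c = '^' then (p.1, p.2 + 1)
  else (p.1, p.2 - 1)

-- port of A's translator: fold carrying (current position, coordinates list), appending after each move
def translator (instructions : List Char) : List (Int × Int) :=
  (instructions.foldl
    (fun (st : (Int × Int) × List (Int × Int)) c =>
      let p := pvMoveA st.1 c
      (p, st.2 ++ [p]))
    ((0, 0), [])).2

def visited_houses2 (instructions : String) : Int :=
  let split := (PySem.List.enumerate instructions.toList 0).foldl
    (fun (st : List Char × List Char) ic =>
      if PySem.Int.mod ic.1 2 == 0 then (st.1 ++ [ic.2], st.2) else (st.1, st.2 ++ [ic.2]))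
    ([], [])
  let coordinates_santa := translator split.1
  let coordinates_robo_santa := translator split.2
  PySem.Set.len (PySem.Set.ofList (coordinates_santa ++ coordinates_robo_santa))

-- ===== PORT B =====
-- helper: B's sign-to-delta table (else = south)
def pvDeltaB (c : Char) : Int × Int :=
  if c = '<' then (-1, 0)
  else if c = '>' then (1, 0)
  else if c = '^' then (0, 1)
  else (0, -1)

def visited_houses2_alt (instructions : String) : Int :=
  let st := (PySem.List.enumerate instructions.toList 0).foldl
    (fun (st : (Int × Int) × (Int × Int) × PySem.Set (Int × Int)) ic =>
      let d := pvDeltaB ic.2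
      if PySem.Int.mod ic.1 2 == 0 then
        let santa := (st.1.1 + d.1, st.1.2 + d.2)
        (santa, st.2.1, PySem.Set.add st.2.2 santa)
      else
        let robo := (st.2.1.1 + d.1, st.2.1.2 + d.2)
        (st.1, robo, PySem.Set.add st.2.2 robo))
    ((0, 0), (0, 0), PySem.Set.empty)
  PySem.Set.len st.2.2

-- ===== PRECONDITION & SPEC =====
def Spec_visited_houses2 (instructions : String) (out : Int) : Prop := out = visited_houses2_alt instructions
instance (instructions : String) (out : Int) : Decidable (Spec_visited_houses2 instructions out) := by unfold Spec_visited_houses2; infer_instance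

-- ===== CLAIM (what is proved, stated in full; the proofs are below) =====
def Claim_equal_visited_houses2 : Prop := ∀ (instructions : String), Dom_visited_houses2 instructions → Spec_visited_houses2 instructions (visited_houses2 instructions)

-- ===== LEMMAS AND PROOFS =====

-- chars at alternating slots: pvAlts true cs = even positions, pvAlts false cs = odd positions
def pvAlts {α : Type} (b : Bool) : List α → List α
  | [] => []
  | c :: cs => if b then c :: pvAlts (!b) cs else pvAlts (!b) cs

-- positions visited from p along cs
def pvPath (p : Int × Int) : List Char → List (Int × Int)
  | [] => []
  | c :: cs => let q := pvMoveA p c; q :: pvPath q cs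

-- interleaved walk: the agent at the first slot moves first, roles swap each step
def pvVisit (sp rp : Int × Int) : List Char → List (Int × Int)
  | [] => []
  | c :: cs => let q := pvMoveA sp c; q :: pvVisit rp q cs

theorem pvMod2_flip (k : Int) : (PySem.Int.mod (k + 1) 2 == 0) = !(PySem.Int.mod k 2 == 0) := by
  have h2 : (0 : Int) < 2 := by omega
  rw [PySem.Int.mod_eq_emod_of_pos h2, PySem.Int.mod_eq_emod_of_pos h2]
  rcases Int.emod_two_eq_zero_or_one k with h | h
  · have h1 : (k + 1) % 2 = 1 := by omega
    simp [h, h1]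
  · have h1 : (k + 1) % 2 = 0 := by omega
    simp [h, h1]

theorem pvSplit_enum (cs : List Char) :
    ∀ (k : Int) (sa ra : List Char),
      (PySem.List.enumerate cs k).foldl
        (fun (st : List Char × List Char) ic =>
          if PySem.Int.mod ic.1 2 == 0 then (st.1 ++ [ic.2], st.2) else (st.1, st.2 ++ [ic.2]))
        (sa, ra)
      = (sa ++ pvAlts (PySem.Int.mod k 2 == 0) cs, ra ++ pvAlts (!(PySem.Int.mod k 2 == 0)) cs) := by
  induction cs with
  | nil => intro k sa ra; simp [PySem.List.enumerate_nil, pvAlts]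
  | cons c cs ih =>
    intro k sa ra
    rw [PySem.List.enumerate_cons, List.foldl_cons]
    cases h : (PySem.Int.mod k 2 == 0) <;>
      simp only [Bool.false_eq_true, if_false, if_true, Bool.not_false, Bool.not_true] <;>
      rw [ih (k + 1), pvMod2_flip, h] <;>
      simp [pvAlts]

theorem pvMoveA_delta (p : Int × Int) (c : Char) :
    (p.1 + (pvDeltaB c).1, p.2 + (pvDeltaB c).2) = pvMoveA p c := by
  unfold pvDeltaB pvMoveA
  split_ifs <;> simp <;> ring_nf

theorem pvWalk_enum (cs : List Char) :
    ∀ (k : Int) (sp rp : Int × Int) (s0 : PySem.Set (Int × Int)),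
      ((PySem.List.enumerate cs k).foldl
        (fun (st : (Int × Int) × (Int × Int) × PySem.Set (Int × Int)) ic =>
          let d := pvDeltaB ic.2
          if PySem.Int.mod ic.1 2 == 0 then
            let santa := (st.1.1 + d.1, st.1.2 + d.2)
            (santa, st.2.1, PySem.Set.add st.2.2 santa)
          else
            let robo := (st.2.1.1 + d.1, st.2.1.2 + d.2)
            (st.1, robo, PySem.Set.add st.2.2 robo))
        (sp, rp, s0)).2.2
      = (if PySem.Int.mod k 2 == 0 then pvVisit sp rp cs else pvVisit rp sp cs).foldl
          (fun s q => PySem.Set.add s q) s0 := by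
  induction cs with
  | nil => intro k sp rp s0; cases h : (PySem.Int.mod k 2 == 0) <;> simp [PySem.List.enumerate_nil, pvVisit]
  | cons c cs ih =>
    intro k sp rp s0
    rw [PySem.List.enumerate_cons, List.foldl_cons]
    cases h : (PySem.Int.mod k 2 == 0) <;>
      simp only [Bool.false_eq_true, if_false, if_true] <;>
      rw [ih (k + 1), pvMod2_flip, h] <;>
      simp [pvVisit, pvMoveA_delta]

theorem pvVisit_perm (cs : List Char) :
    ∀ (sp rp : Int × Int),
      (pvVisit sp rp cs).Perm (pvPath sp (pvAlts true cs) ++ pvPath rp (pvAlts false cs)) := by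
  induction cs with
  | nil => intro sp rp; simp [pvVisit, pvAlts, pvPath]
  | cons c cs ih =>
    intro sp rp
    simp only [pvVisit, pvAlts, if_pos, Bool.not_true, pvPath, List.cons_append]
    exact List.Perm.cons _ ((ih rp (pvMoveA sp c)).trans List.perm_append_comm)

theorem pvTranslator_aux (cs : List Char) :
    ∀ (p : Int × Int) (acc : List (Int × Int)),
      (cs.foldl (fun (st : (Int × Int) × List (Int × Int)) c =>
          let q := pvMoveA st.1 c
          (q, st.2 ++ [q])) (p, acc)).2 = acc ++ pvPath p cs := by
  induction cs with
  | nil => intro p acc; simp [pvPath]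
  | cons c cs ih => intro p acc; simp [pvPath, ih]

theorem pvTranslator_eq (cs : List Char) : translator cs = pvPath (0, 0) cs := by
  simpa [translator] using pvTranslator_aux cs (0, 0) []

theorem pvOfList_len_of_perm {l1 l2 : List (Int × Int)} (h : l1.Perm l2) :
    (PySem.Set.ofList l1).length = (PySem.Set.ofList l2).length := by
  have hmem : ∀ x, x ∈ PySem.Set.ofList l1 ↔ x ∈ PySem.Set.ofList l2 := by
    intro x
    rw [PySem.Set.mem_ofList, PySem.Set.mem_ofList]
    exact ⟨fun hx => h.mem_iff.mp hx, fun hx => h.mem_iff.mpr hx⟩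
  exact ((List.perm_ext_iff_of_nodup (PySem.Set.nodup_ofList _) (PySem.Set.nodup_ofList _)).mpr hmem).length_eq

-- ===== VERDICT (by name: the statement is the Claim_ definition above) =====
theorem visited_houses2_spec : Claim_equal_visited_houses2 := by
  intro instructions _
  unfold Spec_visited_houses2
  simp only [visited_houses2, visited_houses2_alt]
  rw [pvSplit_enum, pvWalk_enum]
  rw [show (PySem.Int.mod 0 2 == 0) = true from by decide]
  simp only [if_true, List.nil_append, pvTranslator_eq]
  have hfold : (pvVisit (0, 0) (0, 0) instructions.toList).foldl
      (fun s q => PySem.Set.add s q) PySem.Set.empty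
      = PySem.Set.ofList (pvVisit (0, 0) (0, 0) instructions.toList) := by
    rw [PySem.Set.ofList_eq_foldl]
    rfl
  rw [hfold]
  have hlen := pvOfList_len_of_perm (pvVisit_perm instructions.toList (0, 0) (0, 0))
  simp [PySem.Set.len, hlen]
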